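-- pv_equiv track=rewrite | github.com/DobrinyaGosling/pivo | array.py | search_sorted
-- ===== SOURCE A (Python) =====
-- def search_sorted(sorted_arr, el: int):
--     positions_of_el = []
--
--     for i, row in enumerate(sorted_arr):
--         for j in range(len(row)):
--             if row[j] == el:
--                 tuple_position = (i, j)
--                 positions_of_el.append(tuple_position)
--
--     if len(positions_of_el) > 0:
--         return positions_of_el
--     else:
--         return None
-- ===== SOURCE B (Python) =====
-- def search_sorted(sorted_arr, el: int):
--     # group every cell of the array by its value, then answer by one dict lookup
--     index = {}
--     for i, row in enumerate(sorted_arr):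
--         for j, v in enumerate(row):
--             index.setdefault(v, []).append((i, j))
--     return index.get(el)
-- ===== Notes on version B (the rewrite author's own statement) =====
-- stated objective: alternative
-- what changed: B never compares cells against el: it groups all (i, j) positions by cell value into a dict in one pass and answers with a single dict lookup (index.get(el)), which also yields None for 'no match' for free, replacing A's scan-compare-collect plus final emptiness test.
import Mathlib
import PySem

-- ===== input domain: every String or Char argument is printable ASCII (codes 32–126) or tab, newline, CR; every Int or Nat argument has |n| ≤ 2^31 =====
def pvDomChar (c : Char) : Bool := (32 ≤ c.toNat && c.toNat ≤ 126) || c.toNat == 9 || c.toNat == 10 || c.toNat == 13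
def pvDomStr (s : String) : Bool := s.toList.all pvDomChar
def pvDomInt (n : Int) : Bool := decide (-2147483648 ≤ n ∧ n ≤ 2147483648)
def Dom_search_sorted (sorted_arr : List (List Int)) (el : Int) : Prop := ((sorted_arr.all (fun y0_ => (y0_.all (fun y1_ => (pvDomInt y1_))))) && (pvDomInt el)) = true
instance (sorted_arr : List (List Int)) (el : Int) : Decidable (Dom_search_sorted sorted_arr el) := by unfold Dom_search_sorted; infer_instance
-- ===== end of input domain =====

-- B groups every cell position by its value into a dict and answers with one lookup
-- (index.get(el)), instead of A's compare-against-el scan plus final emptiness test.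

-- ===== PORT A =====
def search_sorted (sorted_arr : List (List Int)) (el : Int) : Option (List (Int × Int)) :=
  let st := sorted_arr.foldl
    (fun (st : Nat × List (Int × Int)) row =>
      (st.1 + 1,
        (List.range row.length).foldl
          (fun acc (j : Nat) => if row.getD j 0 = el then acc ++ [((st.1 : Int), (j : Int))] else acc)
          st.2))
    (0, [])
  if st.2.length > 0 then some st.2 else none

-- ===== PORT B =====
-- inner loop of Source B: for j, v in enumerate(row): index.setdefault(v, []).append((i, j))
-- (setdefault(v, []).append(p) is exactly d[v] = d.get(v, []) + [p], i.e. Dict.modify)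
def indexRow (row : List Int) (i : Int) (st : Nat × PySem.Dict Int (List (Int × Int))) :
    Nat × PySem.Dict Int (List (Int × Int)) :=
  row.foldl (fun st v => (st.1 + 1, st.2.modify v [] (· ++ [(i, (st.1 : Int))]))) st

def search_sorted_alt (sorted_arr : List (List Int)) (el : Int) : Option (List (Int × Int)) :=
  let st := sorted_arr.foldl
    (fun (st : Nat × PySem.Dict Int (List (Int × Int))) row =>
      (st.1 + 1, (indexRow row (st.1 : Int) (0, st.2)).2))
    (0, PySem.Dict.empty)
  st.2.get? el

-- ===== PRECONDITION & SPEC =====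
-- (both programs are total: no Pre_)
def Spec_search_sorted (sorted_arr : List (List Int)) (el : Int) (out : Option (List (Int × Int))) : Prop := out = search_sorted_alt sorted_arr el
instance (sorted_arr : List (List Int)) (el : Int) (out : Option (List (Int × Int))) : Decidable (Spec_search_sorted sorted_arr el out) := by unfold Spec_search_sorted; infer_instance

-- ===== CLAIM =====
def Claim_equal_search_sorted : Prop := ∀ (sorted_arr : List (List Int)) (el : Int), Dom_search_sorted sorted_arr el → Spec_search_sorted sorted_arr el (search_sorted sorted_arr el)

-- ===== LEMMAS AND PROOFS =====

-- the positions of el in row, counting from index j (the common yardstick of both row loops)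
def Mrow (row : List Int) (el : Int) (i : Int) (j : Nat) : List (Int × Int) :=
  match row with
  | [] => []
  | v :: r => (if v = el then [(i, (j : Int))] else []) ++ Mrow r el i (j + 1)

-- A's inner index loop appends exactly Mrow
theorem A_row_aux (el : Int) (i : Int) :
    ∀ (n : Nat) (row : List Int) (k : Nat) (acc : List (Int × Int)), row.length - k = n →
      (List.range' k n).foldl
          (fun acc (j : Nat) => if row.getD j 0 = el then acc ++ [(i, (j : Int))] else acc) acc
        = acc ++ Mrow (row.drop k) el i k := by
  intro n
  induction n with
  | zero =>
    intro row k acc hn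
    have : row.drop k = [] := List.drop_eq_nil_of_le (by omega)
    simp [this, Mrow]
  | succ n ih =>
    intro row k acc hn
    have hk : k < row.length := by omega
    have hdrop : row.drop k = row[k] :: row.drop (k + 1) := List.drop_eq_getElem_cons hk
    have hget : row.getD k 0 = row[k] := List.getD_eq_getElem row 0 hk
    rw [List.range'_succ, List.foldl_cons, hdrop]
    by_cases hv : row[k] = el
    · rw [if_pos (by rw [hget]; exact hv), ih row (k + 1) _ (by omega)]
      simp [Mrow, hv, List.append_assoc]
    · rw [if_neg (by rw [hget]; exact hv), ih row (k + 1) _ (by omega)]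
      simp [Mrow, hv]

theorem A_row (el : Int) (i : Int) (row : List Int) (acc : List (Int × Int)) :
    (List.range row.length).foldl
        (fun acc (j : Nat) => if row.getD j 0 = el then acc ++ [(i, (j : Int))] else acc) acc
      = acc ++ Mrow row el i 0 := by
  have := A_row_aux el i row.length row 0 acc (by omega)
  simpa [List.range_eq_range'] using this

-- B's inner enumerate loop: what the dict knows about el afterwards
theorem B_row (el : Int) (i : Int) :
    ∀ (row : List Int) (j : Nat) (d : PySem.Dict Int (List (Int × Int))),
      (indexRow row i (j, d)).2.getD el [] = d.getD el [] ++ Mrow row el i j ∧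
      ((indexRow row i (j, d)).2.contains el = true ↔
        d.contains el = true ∨ Mrow row el i j ≠ []) := by
  intro row
  induction row with
  | nil => intro j d; simp [indexRow, Mrow]
  | cons v r ih =>
    intro j d
    have hstep : indexRow (v :: r) i (j, d)
        = indexRow r i (j + 1, d.modify v [] (· ++ [(i, (j : Int))])) := by
      simp [indexRow]
    rw [hstep]
    obtain ⟨h1, h2⟩ := ih (j + 1) (d.modify v [] (· ++ [(i, (j : Int))]))
    constructor
    · rw [h1, PySem.Dict.getD_modify]
      by_cases hv : el = v
      · simp [Mrow, hv, List.append_assoc]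
      · have hv' : ¬ v = el := fun h => hv h.symm
        simp [Mrow, hv, hv']
    · rw [h2, PySem.Dict.contains_modify]
      by_cases hv : el = v
      · simp [Mrow, hv]
      · have hv' : ¬ v = el := fun h => hv h.symm
        simp [Mrow, hv, hv']

-- the two outer row loops, run in lockstep: the dict's view of el is A's accumulator
theorem outer (el : Int) :
    ∀ (rows : List (List Int)) (iN : Nat) (acc : List (Int × Int))
      (d : PySem.Dict Int (List (Int × Int))),
      d.getD el [] = acc → (d.contains el = true ↔ acc ≠ []) →
      (rows.foldl
          (fun (st : Nat × PySem.Dict Int (List (Int × Int))) row =>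
            (st.1 + 1, (indexRow row (st.1 : Int) (0, st.2)).2))
          (iN, d)).2.getD el []
        = (rows.foldl
            (fun (st : Nat × List (Int × Int)) row =>
              (st.1 + 1,
                (List.range row.length).foldl
                  (fun acc (j : Nat) => if row.getD j 0 = el then acc ++ [((st.1 : Int), (j : Int))] else acc)
                  st.2))
            (iN, acc)).2 ∧
      ((rows.foldl
          (fun (st : Nat × PySem.Dict Int (List (Int × Int))) row =>
            (st.1 + 1, (indexRow row (st.1 : Int) (0, st.2)).2))
          (iN, d)).2.contains el = true ↔
        (rows.foldl
            (fun (st : Nat × List (Int × Int)) row =>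
              (st.1 + 1,
                (List.range row.length).foldl
                  (fun acc (j : Nat) => if row.getD j 0 = el then acc ++ [((st.1 : Int), (j : Int))] else acc)
                  st.2))
            (iN, acc)).2 ≠ []) := by
  intro rows
  induction rows with
  | nil => intro iN acc d h1 h2; exact ⟨h1, h2⟩
  | cons row rest ih =>
    intro iN acc d h1 h2
    simp only [List.foldl_cons]
    obtain ⟨b1, b2⟩ := B_row el (iN : Int) row 0 d
    rw [A_row el (iN : Int) row acc]
    refine ih (iN + 1) (acc ++ Mrow row el (iN : Int) 0) _ (by rw [b1, h1]) ?_
    rw [b2, h2, Ne, Ne, Ne, List.append_eq_nil_iff, not_and_or]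

-- the two final answers coincide once the dict's view of el is A's full accumulator
theorem final_eq (el : Int) (acc : List (Int × Int)) (d : PySem.Dict Int (List (Int × Int)))
    (h1 : d.getD el [] = acc) (h2 : d.contains el = true ↔ acc ≠ []) :
    (if acc.length > 0 then some acc else none) = d.get? el := by
  by_cases hz : acc = []
  · subst hz
    have hc : d.contains el = false := by
      cases hcc : d.contains el
      · rfl
      · exact absurd (h2.mp hcc) (by simp)
    rw [(PySem.Dict.get?_eq_none_iff_contains d el).mpr hc]
    simp
  · have hc := h2.mpr hz
    have hsome : (d.get? el).isSome := by
      rw [← PySem.Dict.contains_eq_isSome_get?]; exact hc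
    obtain ⟨x, hx⟩ := Option.isSome_iff_exists.mp hsome
    have hgd := PySem.Dict.getD_eq_get?_getD d el []
    rw [hx, Option.getD_some] at hgd
    have hxa : x = acc := by rw [← hgd, h1]
    rw [hx, hxa, if_pos (List.length_pos_of_ne_nil hz)]

-- ===== VERDICT =====
theorem search_sorted_spec : Claim_equal_search_sorted := by
  intro arr el _
  unfold Spec_search_sorted search_sorted search_sorted_alt
  obtain ⟨h1, h2⟩ := outer el arr 0 [] PySem.Dict.empty (by simp) (by simp)
  exact final_eq el _ _ h1 h2
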